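-- pv_equiv track=rewrite | github.com/strikersps/Competitive-Programming | Code-Chef/Of-What-Holds-the-Universe/of_what_holds_the_universe.py | compute_total_numbers
-- ===== SOURCE A (Python) =====
-- def conversion_to_base_3(n):
--     n_base_3 = list()
--     while n:
--         n_base_3.append(n % 3)
--         n = int(n / 3)
--     return n_base_3[::-1]
--
-- def compute_total_numbers(n):
--     n_base_3 = conversion_to_base_3(n)
--     first_occurrence = False
--     for index, data in enumerate(n_base_3):
--         if not first_occurrence and n_base_3[index] == 2:
--             first_occurrence = True
--             n_base_3[index] = 1
--         elif first_occurrence: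
--             n_base_3[index] = 1
--     return int("".join(map(str, n_base_3)), 2)
-- ===== SOURCE B (Python) =====
-- def compute_total_numbers(n):
--     digits = []
--     while n:
--         digits.append(n % 3)
--         n = int(n / 3)
--     digits.reverse()
--     if 2 in digits:
--         j = digits.index(2)
--         k = len(digits) - j
--         prefix = 0
--         for d in digits[:j]:
--             prefix = 2 * prefix + d
--         return (prefix << k) + ((1 << k) - 1)
--     val = 0
--     for d in digits:
--         val = 2 * val + d
--     return val
-- ===== Notes on version B (the rewrite author's own statement) =====
-- stated objective: alternative
-- what changed: Instead of overwriting the digit list from the first occurrence of digit two onward and re-parsing it as a binary string, B locates that occurrence with index(), folds the untouched prefix into a number, and produces the all-ones suffix arithmetically in closed form, with no string building or parsing at all.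
import Mathlib
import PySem

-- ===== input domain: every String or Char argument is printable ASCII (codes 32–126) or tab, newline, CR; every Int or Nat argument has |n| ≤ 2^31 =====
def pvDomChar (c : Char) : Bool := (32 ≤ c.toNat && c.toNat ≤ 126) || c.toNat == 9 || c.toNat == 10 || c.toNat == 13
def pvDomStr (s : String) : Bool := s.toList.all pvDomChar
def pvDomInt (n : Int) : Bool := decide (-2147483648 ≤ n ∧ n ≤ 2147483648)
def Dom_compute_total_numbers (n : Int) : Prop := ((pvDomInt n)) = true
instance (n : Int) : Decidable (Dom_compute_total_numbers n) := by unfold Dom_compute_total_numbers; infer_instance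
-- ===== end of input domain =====

-- B replaces A's overwrite-then-reparse-as-binary-string with index-of-first-2 plus a
-- closed-form all-ones suffix (prefix<<k)+(2^k-1); same cost, no string round-trip.


-- ===== PORT A =====
-- 'while n: append(n % 3); n = int(n / 3)' in append order; int(n/3) truncates toward
-- zero, which is exactly Int.tdiv on the |n| ≤ 2^31 domain (the float quotient never
-- rounds across an integer boundary there).
def pvLoop3 (n : Int) : List Int :=
  if n = 0 then [] else PySem.Int.mod n 3 :: pvLoop3 (n.tdiv 3)
termination_by n.natAbs
decreasing_by
  rename_i h
  rw [Int.natAbs_tdiv]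
  exact Nat.div_lt_self (by omega) (by omega)

-- the for-loop over enumerate with the first_occurrence flag, mutating the list in place
def pvMask (first : Bool) : List Int → List Int
  | [] => []
  | d :: rest =>
    if !first && d == 2 then 1 :: pvMask true rest
    else if first then 1 :: pvMask true rest
    else d :: pvMask first rest

-- int("".join(map(str, l)), 2): each digit (0..2) prints as one char; int(·, 2) raises
-- (none) on the empty string and on any char other than '0'/'1', else reads binary.
def pvParseBin? (l : List Int) : Option Int :=
  if l = [] ∨ ¬ l.all (fun d => d = 0 ∨ d = 1) then none
  else some (l.foldl (fun a d => 2 * a + d) 0)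

def compute_total_numbers (n : Int) : Int :=
  (pvParseBin? (pvMask false ((pvLoop3 n).reverse))).getD 0

-- ===== PORT B =====
-- Source B builds the same base-3 digit list (same while loop, so the helper is shared),
-- then: if a 2 occurs, j = digits.index(2), k = len - j, fold digits[:j] into prefix,
-- return (prefix << k) + ((1 << k) - 1); else fold all digits as binary.
def compute_total_numbers_alt (n : Int) : Int :=
  let digits := (pvLoop3 n).reverse
  if digits.contains 2 then
    let j : Nat := (PySem.List.index? digits 2).getD 0
    let k : Nat := digits.length - j
    let pre := (PySem.List.slice digits none (some (j : Int))).foldl (fun a d => 2 * a + d) 0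
    pre * 2 ^ k + (2 ^ k - 1)
  else digits.foldl (fun a d => 2 * a + d) 0

-- ===== PRECONDITION & SPEC =====
-- n = 0 yields the empty digit list, on which Python A raises ValueError (int('', 2)).
def Pre_compute_total_numbers (n : Int) : Prop := n ≠ 0
instance (n : Int) : Decidable (Pre_compute_total_numbers n) := by
  unfold Pre_compute_total_numbers; infer_instance
def pvWitness_compute_total_numbers : Int := 5

def Spec_compute_total_numbers (n : Int) (out : Int) : Prop := out = compute_total_numbers_alt n
instance (n : Int) (out : Int) : Decidable (Spec_compute_total_numbers n out) := by
  unfold Spec_compute_total_numbers; infer_instance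

-- ===== CLAIM (what is proved, stated in full; the proofs are below) =====
def Claim_equal_compute_total_numbers : Prop := ∀ (n : Int), Dom_compute_total_numbers n → Pre_compute_total_numbers n → Spec_compute_total_numbers n (compute_total_numbers n)

-- ===== LEMMAS AND PROOFS =====

-- every base-3 digit is 0, 1 or 2
theorem pvLoop3_digits (n : Int) : ∀ d ∈ pvLoop3 n, d = 0 ∨ d = 1 ∨ d = 2 := by
  induction n using pvLoop3.induct with
  | case1 =>
    rw [pvLoop3, if_pos rfl]; intro d hd; cases hd
  | case2 n h ih =>
    rw [pvLoop3, if_neg h]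
    intro d hd
    rcases List.mem_cons.mp hd with h1 | h2
    · have h0 := PySem.Int.mod_nonneg n (b := 3) (by omega)
      have h3 := PySem.Int.mod_lt n (b := 3) (by omega)
      omega
    · exact ih d h2

theorem pvLoop3_ne_nil (n : Int) (h : n ≠ 0) : pvLoop3 n ≠ [] := by
  rw [pvLoop3, if_neg h]; simp

-- the flag=false loop leaves a 2-free list unchanged
theorem pvMask_false_of_no2 (l : List Int) (h : 2 ∉ l) : pvMask false l = l := by
  induction l with
  | nil => rfl
  | cons d rest ih =>
    have hd : d ≠ 2 := fun hd => h (hd ▸ List.mem_cons_self)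
    have : (d == (2 : Int)) = false := by simpa using hd
    simp [pvMask, this, ih (fun hm => h (List.mem_cons_of_mem _ hm))]

-- the flag=false loop passes over a 2-free prefix
theorem pvMask_false_append (p t : List Int) (h : 2 ∉ p) :
    pvMask false (p ++ t) = p ++ pvMask false t := by
  induction p with
  | nil => rfl
  | cons d rest ih =>
    have hd : d ≠ 2 := fun hd => h (hd ▸ List.mem_cons_self)
    have : (d == (2 : Int)) = false := by simpa using hd
    simp [pvMask, this, ih (fun hm => h (List.mem_cons_of_mem _ hm))]

-- once the flag is set, the rest is overwritten by ones
theorem pvMask_true (l : List Int) : pvMask true l = List.replicate l.length 1 := by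
  induction l with
  | nil => rfl
  | cons d rest ih => simp [pvMask, ih, List.replicate_succ]

-- binary fold over k ones
theorem pvFold_replicate (k : Nat) (a : Int) :
    (List.replicate k (1 : Int)).foldl (fun a d => 2 * a + d) a = a * 2 ^ k + (2 ^ k - 1) := by
  induction k generalizing a with
  | zero => simp
  | succ k ih =>
    rw [List.replicate_succ, List.foldl_cons, ih]
    ring

theorem pv_main (n : Int) (h : n ≠ 0) :
    compute_total_numbers n = compute_total_numbers_alt n := by
  unfold compute_total_numbers compute_total_numbers_alt
  set L := (pvLoop3 n).reverse with hL
  have hdig : ∀ d ∈ L, d = 0 ∨ d = 1 ∨ d = 2 := by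
    intro d hd
    exact pvLoop3_digits n d (List.mem_reverse.mp hd)
  have hne : L ≠ [] := by
    simpa [hL] using pvLoop3_ne_nil n h
  by_cases h2 : 2 ∈ L
  · -- split L at the first 2
    have hsome : (PySem.List.index? L 2).isSome := (PySem.List.index?_isSome_iff L 2).mpr h2
    obtain ⟨j, hj⟩ := Option.isSome_iff_exists.mp hsome
    obtain ⟨p, s, hsplit, hplen, hp2⟩ := (PySem.List.index?_eq_some_iff L 2 j).mp hj
    have hcon : L.contains 2 = true := by simpa using h2
    have hp01 : ∀ d ∈ p, d = 0 ∨ d = 1 := by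
      intro d hd
      have := hdig d (hsplit ▸ List.mem_append_left _ hd)
      have hdne : d ≠ 2 := fun he => hp2 (he ▸ hd)
      omega
    have hmask : pvMask false L = p ++ List.replicate (s.length + 1) 1 := by
      rw [hsplit, pvMask_false_append p _ hp2]
      simp [pvMask, pvMask_true, List.replicate_succ]
    have hall : (pvMask false L).all (fun d => d = 0 ∨ d = 1) := by
      rw [hmask]
      rw [List.all_eq_true]
      intro d hd
      rcases List.mem_append.mp hd with hd | hd
      · simpa using hp01 d hd
      · have := List.eq_of_mem_replicate hd
        simp [this]
    have hmne : pvMask false L ≠ [] := by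
      rw [hmask]; simp
    rw [pvParseBin?, if_neg (by push Not; exact ⟨hmne, hall⟩)]
    simp only [Option.getD_some, hcon, if_true, hj]
    rw [hmask, List.foldl_append, pvFold_replicate]
    rw [hsplit, ← hplen, PySem.List.slice_to_natCast, List.take_left]
    have hk : (p ++ 2 :: s).length - p.length = s.length + 1 := by simp
    rw [hk]
  · -- no 2: the mask is the identity and both sides fold the same list
    have hcon : L.contains 2 = false := by simpa using h2
    have hall : L.all (fun d => d = 0 ∨ d = 1) := by
      rw [List.all_eq_true]
      intro d hd
      have := hdig d hd
      have hdne : d ≠ 2 := fun he => h2 (he ▸ hd)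
      simp; omega
    simp only [hcon, Bool.false_eq_true, if_false]
    rw [pvMask_false_of_no2 L h2, pvParseBin?, if_neg (by push Not; exact ⟨hne, hall⟩)]
    rfl

-- ===== VERDICT (by name: the statement is the Claim_ definition above) =====
theorem compute_total_numbers_spec : Claim_equal_compute_total_numbers := by
  intro n _ hpre
  exact pv_main n hpre
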